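-- pv_equiv track=rewrite | github.com/SomilKSharma/AdvancedDSA | Queues/summaximini.py | solve
-- ===== SOURCE A (Python) =====
-- from collections import deque
--
-- def solve(A, B):
--
--     #deques for maximum and minimum
--     maxi=deque()
--     mini=deque()
--
--     #iterate through the first window
--     for index in range(B):
--         #get the value
--         value=A[index]
--         #iterate for each value
--         while maxi and maxi[-1]<value:
--             maxi.pop()
--         while mini and mini[-1]>value:
--             mini.pop()
--         #add the value
--         maxi.append(value)
--         mini.append(value)
--
--     #get a sums variable
--     sums=0
--     sums=sums+maxi[0]+mini[0]
--
--     #slide the window to get the answer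
--     for index in range(len(A)-B):
--         #check for left most value
--         value=A[index]
--         #compare with the first element of the deque
--         if value==maxi[0]:
--             maxi.popleft()
--         if value==mini[0]:
--             mini.popleft()
--         #get the right most element
--         value=A[index+B]
--         #iterate for each value
--         while maxi and maxi[-1]<value:
--             maxi.pop()
--         while mini and mini[-1]>value:
--             mini.pop()
--         #add the value
--         maxi.append(value)
--         mini.append(value)
--         #sum the value
--         sums=sums+maxi[0]+mini[0]
--
--     #return the value
--     return sums%1000000007
-- ===== SOURCE B (Python) =====
-- def solve(A, B):
--     total = 0
--     for i in range(len(A) - B + 1):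
--         mx = A[i]
--         mn = A[i]
--         for j in range(1, B):
--             v = A[i + j]
--             if v > mx:
--                 mx = v
--             if v < mn:
--                 mn = v
--         total += mx + mn
--     return total % 1000000007
-- ===== Notes on version B (the rewrite author's own statement) =====
-- stated objective: simpler
-- what changed: Replaces the two maintained monotonic deques and the two-phase window slide with a direct O(n*B) scan: for each window recompute its max and min by an indexed pass over the B elements and accumulate max+min.
import Mathlib
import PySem

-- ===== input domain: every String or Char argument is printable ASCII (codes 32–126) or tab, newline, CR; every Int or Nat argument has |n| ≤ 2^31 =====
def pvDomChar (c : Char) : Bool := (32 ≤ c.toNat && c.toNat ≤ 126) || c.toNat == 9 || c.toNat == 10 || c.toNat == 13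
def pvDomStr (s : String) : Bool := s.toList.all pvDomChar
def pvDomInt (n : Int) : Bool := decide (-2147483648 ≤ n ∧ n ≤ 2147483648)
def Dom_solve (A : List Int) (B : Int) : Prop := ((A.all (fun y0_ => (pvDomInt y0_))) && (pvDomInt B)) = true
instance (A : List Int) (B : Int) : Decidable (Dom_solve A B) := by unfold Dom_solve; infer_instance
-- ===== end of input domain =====

-- B replaces A's pair of monotonic deques with a direct per-window rescan (objective: simpler);
-- ports agree on the return value wherever the Python A returns normally (Pre_solve).

-- ===== PORT A =====
-- `while maxi and maxi[-1] < value: maxi.pop()` — pop from the RIGHT end while the last element is < value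
def popLt : List Int → Int → List Int
  | [], _ => []
  | x :: xs, v =>
    match popLt xs v with
    | [] => if x < v then [] else [x]
    | y :: ys => x :: y :: ys

-- `while mini and mini[-1] > value: mini.pop()`
def popGt : List Int → Int → List Int
  | [], _ => []
  | x :: xs, v =>
    match popGt xs v with
    | [] => if v < x then [] else [x]
    | y :: ys => x :: y :: ys

-- pop-loop followed by `maxi.append(value)` (resp. mini)
def pushMax (d : List Int) (v : Int) : List Int := popLt d v ++ [v]
def pushMin (d : List Int) (v : Int) : List Int := popGt d v ++ [v]

-- deque[0] / popleft are headD / tail; A[index] is pyGetD (in range under Pre_solve)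
-- body of A's first loop (one `index` iteration)
def initStep (A : List Int) (st : List Int × List Int) (index : Int) : List Int × List Int :=
  let value := PySem.List.pyGetD A index 0
  (pushMax st.1 value, pushMin st.2 value)

-- body of A's sliding loop (one `index` iteration; state = (maxi, mini, sums))
def slideStep (A : List Int) (B : Int) (st : List Int × List Int × Int) (index : Int) :
    List Int × List Int × Int :=
  let value := PySem.List.pyGetD A index 0
  let maxi := if value = st.1.headD 0 then st.1.tail else st.1
  let mini := if value = st.2.1.headD 0 then st.2.1.tail else st.2.1
  let value2 := PySem.List.pyGetD A (index + B) 0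
  let maxi2 := pushMax maxi value2
  let mini2 := pushMin mini value2
  (maxi2, mini2, st.2.2 + maxi2.headD 0 + mini2.headD 0)

def solve (A : List Int) (B : Int) : Int :=
  let p := (PySem.List.pyRange 0 B 1).foldl (initStep A) ([], [])
  let sums : Int := 0 + p.1.headD 0 + p.2.headD 0
  let q := (PySem.List.pyRange 0 ((A.length : Int) - B) 1).foldl (slideStep A B) (p.1, p.2, sums)
  PySem.Int.mod q.2.2 1000000007

-- ===== PORT B =====
def solve_alt (A : List Int) (B : Int) : Int :=
  let total := (PySem.List.pyRange 0 ((A.length : Int) - B + 1) 1).foldl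
    (fun (total : Int) i =>
      let a0 := PySem.List.pyGetD A i 0
      let p := (PySem.List.pyRange 1 B 1).foldl
        (fun (p : Int × Int) j =>
          let v := PySem.List.pyGetD A (i + j) 0
          (if v > p.1 then v else p.1, if v < p.2 then v else p.2)) (a0, a0)
      total + (p.1 + p.2)) 0
  PySem.Int.mod total 1000000007

-- ===== PRECONDITION & SPEC =====
-- A raises IndexError unless 1 ≤ B ≤ len(A) (empty window indexing for B ≤ 0, out-of-range read for B > len(A))
def Pre_solve (A : List Int) (B : Int) : Prop := 1 ≤ B ∧ B ≤ (A.length : Int)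
instance (A : List Int) (B : Int) : Decidable (Pre_solve A B) := by unfold Pre_solve; infer_instance
def pvWitness_solve : List Int × Int := ([3, 1, 4, 1, 5], 3)

def Spec_solve (A : List Int) (B : Int) (out : Int) : Prop := out = solve_alt A B
instance (A : List Int) (B : Int) (out : Int) : Decidable (Spec_solve A B out) := by unfold Spec_solve; infer_instance

-- ===== CLAIM (what is proved, stated in full; the proofs are below) =====
def Claim_equal_solve : Prop := ∀ (A : List Int) (B : Int), Dom_solve A B → Pre_solve A B → Spec_solve A B (solve A B)

-- ===== LEMMAS AND PROOFS =====

-- suffix-maxima characterisation of A's deques: the elements ≥ everything to their right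
def suffMax : List Int → List Int
  | [] => []
  | x :: xs => if xs.all (fun y => y ≤ x) then x :: suffMax xs else suffMax xs

def suffMin : List Int → List Int
  | [] => []
  | x :: xs => if xs.all (fun y => x ≤ y) then x :: suffMin xs else suffMin xs

def fmax (a : Int) (t : List Int) : Int := t.foldl max a
def fmin (a : Int) (t : List Int) : Int := t.foldl min a

-- the window at index i and its per-window max/min, and the running answer
def wTail (A : List Int) (b i : Nat) : List Int := (A.drop (i + 1)).take (b - 1)
def wMax (A : List Int) (b i : Nat) : Int := fmax (A.getD i 0) (wTail A b i)
def wMin (A : List Int) (b i : Nat) : Int := fmin (A.getD i 0) (wTail A b i)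
def wSum (A : List Int) (b m : Nat) : Int := ((List.range m).map (fun i => wMax A b i + wMin A b i)).sum

lemma foldl_max_assoc (xs : List Int) : ∀ a z : Int, xs.foldl max (max a z) = max a (xs.foldl max z) := by
  induction xs with
  | nil => intro a z; simp
  | cons w ws ih => intro a z; simp only [List.foldl_cons]; rw [max_assoc]; exact ih a (max z w)
lemma foldl_min_assoc (xs : List Int) : ∀ a z : Int, xs.foldl min (min a z) = min a (xs.foldl min z) := by
  induction xs with
  | nil => intro a z; simp
  | cons w ws ih => intro a z; simp only [List.foldl_cons]; rw [min_assoc]; exact ih a (min z w)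

lemma fmax_all_le (x : Int) (xs : List Int) (h : ∀ y ∈ xs, y ≤ x) : fmax x xs = x := by
  induction xs with
  | nil => rfl
  | cons z zs ih =>
    unfold fmax at *
    simp only [List.foldl_cons]
    rw [max_eq_left (h z (by simp))]
    exact ih (fun y hy => h y (by simp [hy]))
lemma fmin_all_ge (x : Int) (xs : List Int) (h : ∀ y ∈ xs, x ≤ y) : fmin x xs = x := by
  induction xs with
  | nil => rfl
  | cons z zs ih =>
    unfold fmin at *
    simp only [List.foldl_cons]
    rw [min_eq_left (h z (by simp))]
    exact ih (fun y hy => h y (by simp [hy]))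

lemma fmax_cons (x z : Int) (zs : List Int) : fmax x (z :: zs) = max x (fmax z zs) := by
  unfold fmax
  simp only [List.foldl_cons]
  exact foldl_max_assoc zs x z

lemma fmin_cons (x z : Int) (zs : List Int) : fmin x (z :: zs) = min x (fmin z zs) := by
  unfold fmin
  simp only [List.foldl_cons]
  exact foldl_min_assoc zs x z

lemma suffMax_cons (x : Int) (xs : List Int) :
    suffMax (x :: xs) = if xs.all (fun y => y ≤ x) then x :: suffMax xs else suffMax xs := rfl

lemma suffMin_cons (x : Int) (xs : List Int) :
    suffMin (x :: xs) = if xs.all (fun y => x ≤ y) then x :: suffMin xs else suffMin xs := rfl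

lemma suffMax_head (xs : List Int) : ∀ x d : Int, (suffMax (x :: xs)).headD d = fmax x xs := by
  induction xs with
  | nil => intro x d; simp [suffMax, fmax]
  | cons z zs ih =>
    intro x d
    by_cases h : (z :: zs).all (fun y => y ≤ x)
    · have hall : ∀ y ∈ z :: zs, y ≤ x := by simpa using h
      rw [suffMax_cons x (z :: zs), if_pos h, List.headD_cons, fmax_all_le x _ hall]
    · have hex : ∃ y ∈ z :: zs, x < y := by
        have h2 := (by simpa using h : z ≤ x → ∃ y ∈ zs, x < y)
        by_cases hz : z ≤ x
        · obtain ⟨y, hy, hxy⟩ := h2 hz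
          exact ⟨y, List.mem_cons_of_mem _ hy, hxy⟩
        · exact ⟨z, by simp, by omega⟩
      rw [suffMax_cons x (z :: zs), if_neg h, ih z d, fmax_cons]
      obtain ⟨y, hym, hxy⟩ := hex
      have hyf : y ≤ fmax z zs := by
        rcases List.mem_cons.mp hym with rfl | hy
        · exact (PySem.List.le_foldl_max zs y).1
        · exact (PySem.List.le_foldl_max zs z).2 y hy
      exact (max_eq_right (by omega : x ≤ fmax z zs)).symm

lemma suffMin_head (xs : List Int) : ∀ x d : Int, (suffMin (x :: xs)).headD d = fmin x xs := by
  induction xs with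
  | nil => intro x d; simp [suffMin, fmin]
  | cons z zs ih =>
    intro x d
    by_cases h : (z :: zs).all (fun y => x ≤ y)
    · have hall : ∀ y ∈ z :: zs, x ≤ y := by simpa using h
      rw [suffMin_cons x (z :: zs), if_pos h, List.headD_cons, fmin_all_ge x _ hall]
    · have hex : ∃ y ∈ z :: zs, y < x := by
        have h2 := (by simpa using h : x ≤ z → ∃ y ∈ zs, y < x)
        by_cases hz : x ≤ z
        · obtain ⟨y, hy, hxy⟩ := h2 hz
          exact ⟨y, List.mem_cons_of_mem _ hy, hxy⟩
        · exact ⟨z, by simp, by omega⟩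
      rw [suffMin_cons x (z :: zs), if_neg h, ih z d, fmin_cons]
      obtain ⟨y, hym, hxy⟩ := hex
      have hyf : fmin z zs ≤ y := by
        rcases List.mem_cons.mp hym with rfl | hy
        · exact (PySem.List.foldl_min_le zs y).1
        · exact (PySem.List.foldl_min_le zs z).2 y hy
      exact (min_eq_right (by omega : fmin z zs ≤ x)).symm

lemma mem_suffMax (xs : List Int) : ∀ y, y ∈ suffMax xs → y ∈ xs := by
  induction xs with
  | nil => simp [suffMax]
  | cons x xs ih =>
    intro y hy
    unfold suffMax at hy
    split at hy
    · rcases List.mem_cons.mp hy with h | h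
      · simp [h]
      · exact List.mem_cons_of_mem _ (ih y h)
    · exact List.mem_cons_of_mem _ (ih y hy)
lemma mem_suffMin (xs : List Int) : ∀ y, y ∈ suffMin xs → y ∈ xs := by
  induction xs with
  | nil => simp [suffMin]
  | cons x xs ih =>
    intro y hy
    unfold suffMin at hy
    split at hy
    · rcases List.mem_cons.mp hy with h | h
      · simp [h]
      · exact List.mem_cons_of_mem _ (ih y h)
    · exact List.mem_cons_of_mem _ (ih y hy)

lemma popLt_ne_nil_exists (d : List Int) (v : Int) (h : popLt d v ≠ []) : ∃ z ∈ d, v ≤ z := by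
  induction d with
  | nil => simp [popLt] at h
  | cons x xs ih =>
    unfold popLt at h
    cases hz : popLt xs v with
    | nil =>
      rw [hz] at h
      by_cases hv : x < v
      · simp [hv] at h
      · exact ⟨x, by simp, by omega⟩
    | cons y ys =>
      obtain ⟨z, hzm, hzv⟩ := ih (by simp [hz])
      exact ⟨z, List.mem_cons_of_mem _ hzm, hzv⟩
lemma popGt_ne_nil_exists (d : List Int) (v : Int) (h : popGt d v ≠ []) : ∃ z ∈ d, z ≤ v := by
  induction d with
  | nil => simp [popGt] at h
  | cons x xs ih =>
    unfold popGt at h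
    cases hz : popGt xs v with
    | nil =>
      rw [hz] at h
      by_cases hv : v < x
      · simp [hv] at h
      · exact ⟨x, by simp, by omega⟩
    | cons y ys =>
      obtain ⟨z, hzm, hzv⟩ := ih (by simp [hz])
      exact ⟨z, List.mem_cons_of_mem _ hzm, hzv⟩

-- push step preserves the suffix-maxima representation
lemma pushMax_suffMax (w : List Int) : ∀ v, pushMax (suffMax w) v = suffMax (w ++ [v]) := by
  induction w with
  | nil => intro v; simp [pushMax, popLt, suffMax]
  | cons x xs ih =>
    intro v
    have e2 : suffMax ((x :: xs) ++ [v]) =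
        if (xs.all (fun y => y ≤ x)) ∧ v ≤ x then x :: suffMax (xs ++ [v]) else suffMax (xs ++ [v]) := by
      rw [List.cons_append, suffMax_cons]
      simp [List.all_append, and_comm]
    by_cases c : xs.all (fun y => y ≤ x)
    · rw [suffMax_cons, if_pos c]
      cases hz : popLt (suffMax xs) v with
      | nil =>
        have ihe : suffMax (xs ++ [v]) = [v] := by rw [← ih v]; simp [pushMax, hz]
        by_cases hv : x < v
        · rw [e2, if_neg (by omega), ihe]
          simp [pushMax, popLt, hz, hv]
        · rw [e2, if_pos ⟨c, by omega⟩, ihe]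
          simp [pushMax, popLt, hz, hv]
      | cons y ys =>
        have hvx : v ≤ x := by
          obtain ⟨z, hzm, hzv⟩ := popLt_ne_nil_exists (suffMax xs) v (by simp [hz])
          have hall : ∀ y ∈ xs, y ≤ x := by simpa using c
          have hza : z ≤ x := hall z (mem_suffMax xs z hzm)
          omega
        rw [e2, if_pos ⟨c, hvx⟩, ← ih v]
        simp [pushMax, popLt, hz]
    · have hnc : ¬((xs.all (fun y => y ≤ x)) = true ∧ v ≤ x) := fun hh => c hh.1
      rw [suffMax_cons, if_neg c, e2, if_neg hnc, ← ih v]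
lemma pushMin_suffMin (w : List Int) : ∀ v, pushMin (suffMin w) v = suffMin (w ++ [v]) := by
  induction w with
  | nil => intro v; simp [pushMin, popGt, suffMin]
  | cons x xs ih =>
    intro v
    have e2 : suffMin ((x :: xs) ++ [v]) =
        if (xs.all (fun y => x ≤ y)) ∧ x ≤ v then x :: suffMin (xs ++ [v]) else suffMin (xs ++ [v]) := by
      rw [List.cons_append, suffMin_cons]
      simp [List.all_append, and_comm]
    by_cases c : xs.all (fun y => x ≤ y)
    · rw [suffMin_cons, if_pos c]
      cases hz : popGt (suffMin xs) v with
      | nil =>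
        have ihe : suffMin (xs ++ [v]) = [v] := by rw [← ih v]; simp [pushMin, hz]
        by_cases hv : v < x
        · rw [e2, if_neg (by omega), ihe]
          simp [pushMin, popGt, hz, hv]
        · rw [e2, if_pos ⟨c, by omega⟩, ihe]
          simp [pushMin, popGt, hz, hv]
      | cons y ys =>
        have hvx : x ≤ v := by
          obtain ⟨z, hzm, hzv⟩ := popGt_ne_nil_exists (suffMin xs) v (by simp [hz])
          have hall : ∀ y ∈ xs, x ≤ y := by simpa using c
          have hza : x ≤ z := hall z (mem_suffMin xs z hzm)
          omega
        rw [e2, if_pos ⟨c, hvx⟩, ← ih v]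
        simp [pushMin, popGt, hz]
    · have hnc : ¬((xs.all (fun y => x ≤ y)) = true ∧ x ≤ v) := fun hh => c hh.1
      rw [suffMin_cons, if_neg c, e2, if_neg hnc, ← ih v]

lemma foldl_pushMax (w : List Int) : w.foldl pushMax [] = suffMax w := by
  induction w using List.reverseRecOn with
  | nil => rfl
  | append_singleton xs v ih => rw [List.foldl_append, List.foldl_cons, List.foldl_nil, ih, pushMax_suffMax]
lemma foldl_pushMin (w : List Int) : w.foldl pushMin [] = suffMin w := by
  induction w using List.reverseRecOn with
  | nil => rfl
  | append_singleton xs v ih => rw [List.foldl_append, List.foldl_cons, List.foldl_nil, ih, pushMin_suffMin]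

-- the popleft step drops exactly the outgoing element
lemma slideMax (x : Int) (rest : List Int) :
    (if x = (suffMax (x :: rest)).headD 0 then (suffMax (x :: rest)).tail else suffMax (x :: rest)) = suffMax rest := by
  by_cases c : rest.all (fun y => y ≤ x)
  · rw [suffMax_cons, if_pos c]
    simp
  · have hex : ∃ y ∈ rest, x < y := by
      rcases rest with _ | ⟨z, zs⟩
      · simp at c
      · have h2 := (by simpa using c : z ≤ x → ∃ y ∈ zs, x < y)
        by_cases hz : z ≤ x
        · obtain ⟨y, hy, hxy⟩ := h2 hz
          exact ⟨y, List.mem_cons_of_mem _ hy, hxy⟩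
        · exact ⟨z, by simp, by omega⟩
    obtain ⟨y, hym, hxy⟩ := hex
    rcases rest with _ | ⟨z, zs⟩
    · simp at hym
    · have hhead : (suffMax (z :: zs)).headD 0 = fmax z zs := suffMax_head zs z 0
      have hyf : y ≤ fmax z zs := by
        rcases List.mem_cons.mp hym with rfl | hy
        · exact (PySem.List.le_foldl_max zs y).1
        · exact (PySem.List.le_foldl_max zs z).2 y hy
      rw [suffMax_cons, if_neg c, if_neg (by rw [hhead]; omega)]
lemma slideMin (x : Int) (rest : List Int) :
    (if x = (suffMin (x :: rest)).headD 0 then (suffMin (x :: rest)).tail else suffMin (x :: rest)) = suffMin rest := by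
  by_cases c : rest.all (fun y => x ≤ y)
  · rw [suffMin_cons, if_pos c]
    simp
  · have hex : ∃ y ∈ rest, y < x := by
      rcases rest with _ | ⟨z, zs⟩
      · simp at c
      · have h2 := (by simpa using c : x ≤ z → ∃ y ∈ zs, y < x)
        by_cases hz : x ≤ z
        · obtain ⟨y, hy, hxy⟩ := h2 hz
          exact ⟨y, List.mem_cons_of_mem _ hy, hxy⟩
        · exact ⟨z, by simp, by omega⟩
    obtain ⟨y, hym, hxy⟩ := hex
    rcases rest with _ | ⟨z, zs⟩
    · simp at hym
    · have hhead : (suffMin (z :: zs)).headD 0 = fmin z zs := suffMin_head zs z 0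
      have hyf : fmin z zs ≤ y := by
        rcases List.mem_cons.mp hym with rfl | hy
        · exact (PySem.List.foldl_min_le zs y).1
        · exact (PySem.List.foldl_min_le zs z).2 y hy
      rw [suffMin_cons, if_neg c, if_neg (by rw [hhead]; omega)]

-- windows as getD-indexed segments
lemma map_range_getD (A : List Int) (s c : Nat) (h : s + c ≤ A.length) :
    (List.range c).map (fun k => A.getD (s + k) 0) = (A.drop s).take c := by
  apply List.ext_getElem
  · simp
    omega
  · intro k h1 h2
    simp only [List.getElem_map, List.getElem_range, List.getElem_take, List.getElem_drop]
    rw [List.getD_eq_getElem A 0 (by simp at h1 ⊢; omega)]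

lemma window_cons (A : List Int) (b i : Nat) (hb : 1 ≤ b) (hi : i < A.length) :
    (A.drop i).take b = A.getD i 0 :: wTail A b i := by
  obtain ⟨b', rfl⟩ : ∃ b', b = b' + 1 := ⟨b - 1, by omega⟩
  rw [List.drop_eq_getElem_cons hi, List.take_succ_cons, wTail, List.getD_eq_getElem A 0 hi]
  simp

lemma window_shift (A : List Int) (b i : Nat) (hb : 1 ≤ b) (h : i + b < A.length) :
    wTail A b i ++ [A.getD (i + b) 0] = (A.drop (i + 1)).take b := by
  obtain ⟨b', rfl⟩ : ∃ b', b = b' + 1 := ⟨b - 1, by omega⟩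
  have hblt : b' < (A.drop (i + 1)).length := by
    rw [List.length_drop]
    omega
  rw [wTail, show b' + 1 - 1 = b' from rfl, List.take_add_one,
    List.getElem?_eq_getElem hblt]
  simp only [Option.toList_some]
  have he : A.getD (i + (b' + 1)) 0 = (A.drop (i + 1))[b'] := by
    rw [List.getElem_drop, List.getD_eq_getElem A 0 (by omega : i + (b' + 1) < A.length)]
    exact getElem_congr rfl (by omega) (by simp only [List.length_drop] at hblt; omega)
  rw [he]

lemma wSum_succ (A : List Int) (b m : Nat) :
    wSum A b (m + 1) = wSum A b m + (wMax A b m + wMin A b m) := by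
  simp [wSum, List.range_succ]

lemma if_gt_eq_max (a v : Int) : (if v > a then v else a) = max a v := by
  rcases le_or_gt v a with h | h
  · rw [if_neg (not_lt.mpr h), max_eq_left h]
  · rw [if_pos h, max_eq_right h.le]
lemma if_lt_eq_min (a v : Int) : (if v < a then v else a) = min a v := by
  rcases le_or_gt a v with h | h
  · rw [if_neg (not_lt.mpr h), min_eq_left h]
  · rw [if_pos h, min_eq_right h.le]

-- B computes wMax/wMin on each window
lemma alt_eq_wSum (A : List Int) (b : Nat) (hb : 1 ≤ b) (hbn : b ≤ A.length) :
    solve_alt A (b : Int) = PySem.Int.mod (wSum A b (A.length - b + 1)) 1000000007 := by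
  simp only [solve_alt]
  have hcast : (A.length : Int) - (b : Int) + 1 = ((A.length - b + 1 : Nat) : Int) := by omega
  rw [hcast, PySem.List.pyRange_zero_natCast, List.foldl_map]
  congr 1
  refine Eq.trans (PySem.List.foldl_congr_mem _ _
      (fun (t : Int) (i : Nat) => t + (wMax A b i + wMin A b i)) 0 ?_) ?_
  · intro acc i hi
    have hi' : i + b ≤ A.length := by
      have := List.mem_range.mp hi
      omega
    simp only [PySem.List.pyGetD_natCast]
    rw [PySem.List.foldl_prod_mk
      (fun (a : Int) (j : Int) => if PySem.List.pyGetD A ((i : Int) + j) 0 > a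
        then PySem.List.pyGetD A ((i : Int) + j) 0 else a)
      (fun (a : Int) (j : Int) => if PySem.List.pyGetD A ((i : Int) + j) 0 < a
        then PySem.List.pyGetD A ((i : Int) + j) 0 else a)]
    dsimp only
    rw [PySem.List.pyRange_one 1 (b : Int),
      show ((b : Int) - 1).toNat = b - 1 from by omega]
    simp only [List.foldl_map]
    have hmap : (List.range (b - 1)).map (fun k => A.getD (i + 1 + k) 0) = wTail A b i := by
      rw [wTail]
      have := map_range_getD A (i + 1) (b - 1) (by omega)
      simpa using this
    have hx : (List.range (b - 1)).foldl
        (fun (a : Int) (k : Nat) => if PySem.List.pyGetD A ((i : Int) + (1 + (k : Int))) 0 > a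
          then PySem.List.pyGetD A ((i : Int) + (1 + (k : Int))) 0 else a) (A.getD i 0) = wMax A b i := by
      refine Eq.trans (PySem.List.foldl_congr_mem _ _
          (fun (a : Int) (k : Nat) => max a (A.getD (i + 1 + k) 0)) _ ?_) ?_
      · intro a k _
        rw [show (i : Int) + (1 + (k : Int)) = ((i + 1 + k : Nat) : Int) from by push_cast; ring,
          PySem.List.pyGetD_natCast, if_gt_eq_max]
      · rw [wMax, fmax, ← hmap, List.foldl_map]
    have hy : (List.range (b - 1)).foldl
        (fun (a : Int) (k : Nat) => if PySem.List.pyGetD A ((i : Int) + (1 + (k : Int))) 0 < a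
          then PySem.List.pyGetD A ((i : Int) + (1 + (k : Int))) 0 else a) (A.getD i 0) = wMin A b i := by
      refine Eq.trans (PySem.List.foldl_congr_mem _ _
          (fun (a : Int) (k : Nat) => min a (A.getD (i + 1 + k) 0)) _ ?_) ?_
      · intro a k _
        rw [show (i : Int) + (1 + (k : Int)) = ((i + 1 + k : Nat) : Int) from by push_cast; ring,
          PySem.List.pyGetD_natCast, if_lt_eq_min]
      · rw [wMin, fmin, ← hmap, List.foldl_map]
    rw [hx, hy]
  · rw [PySem.List.foldl_add]
    simp [wSum]

-- A's sliding loop maintains (suffMax window, suffMin window, running sum)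
lemma loopA (A : List Int) (b : Nat) (hb : 1 ≤ b) (hbn : b ≤ A.length) :
    ∀ m, m ≤ A.length - b →
    (PySem.List.pyRange 0 (m : Int) 1).foldl (slideStep A (b : Int))
      (suffMax (A.take b), suffMin (A.take b), wSum A b 1)
    = (suffMax ((A.drop m).take b), suffMin ((A.drop m).take b), wSum A b (m + 1)) := by
  intro m
  induction m with
  | zero => intro _; simp
  | succ m ih =>
    intro hm
    rw [show ((m + 1 : Nat) : Int) = (m : Int) + 1 from by push_cast; ring,
      PySem.List.pyRange_one_succ_right (by omega : (0 : Int) ≤ (m : Int)),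
      List.foldl_append, ih (by omega), List.foldl_cons, List.foldl_nil]
    simp only [slideStep]
    rw [show (m : Int) + (b : Int) = ((m + b : Nat) : Int) from by push_cast; ring]
    simp only [PySem.List.pyGetD_natCast]
    have hwm : (A.drop m).take b = A.getD m 0 :: wTail A b m := window_cons A b m hb (by omega)
    rw [hwm]
    rw [slideMax, slideMin, pushMax_suffMax, pushMin_suffMin, window_shift A b m hb (by omega)]
    have hwc : (A.drop (m + 1)).take b = A.getD (m + 1) 0 :: wTail A b (m + 1) :=
      window_cons A b (m + 1) hb (by omega)
    rw [hwc, suffMax_head, suffMin_head, wSum_succ A b (m + 1)]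
    simp only [Prod.mk.injEq, true_and]
    simp only [wMax, wMin]
    ring

lemma a_eq_wSum (A : List Int) (b : Nat) (hb : 1 ≤ b) (hbn : b ≤ A.length) :
    solve A (b : Int) = PySem.Int.mod (wSum A b (A.length - b + 1)) 1000000007 := by
  simp only [solve]
  have h1 : (PySem.List.pyRange 0 (b : Int) 1).foldl (initStep A) ([], []) =
      (suffMax (A.take b), suffMin (A.take b)) := by
    rw [PySem.List.pyRange_zero_natCast, List.foldl_map]
    simp only [initStep, PySem.List.pyGetD_natCast]
    rw [PySem.List.foldl_prod_mk
      (fun (d : List Int) (k : Nat) => pushMax d (A.getD k 0))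
      (fun (d : List Int) (k : Nat) => pushMin d (A.getD k 0))]
    have hmap : (List.range b).map (fun k => A.getD k 0) = A.take b := by
      have := map_range_getD A 0 b (by omega)
      simpa using this
    rw [Prod.mk.injEq]
    constructor
    · rw [← foldl_pushMax, ← hmap, List.foldl_map]
    · rw [← foldl_pushMin, ← hmap, List.foldl_map]
  rw [h1]
  have h0 : A.take b = A.getD 0 0 :: wTail A b 0 := by
    have := window_cons A b 0 hb (by omega)
    simpa using this
  have hsums : (0 : Int) + (suffMax (A.take b)).headD 0 + (suffMin (A.take b)).headD 0 = wSum A b 1 := by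
    rw [h0, suffMax_head, suffMin_head]
    simp only [wSum, wMax, wMin, List.range_one, List.map_cons, List.map_nil, List.sum_cons,
      List.sum_nil]
    ring
  rw [hsums]
  rw [show (A.length : Int) - (b : Int) = ((A.length - b : Nat) : Int) from by omega]
  have hloop := loopA A b hb hbn (A.length - b) (le_refl _)
  rw [show A.take b = (A.drop 0).take b from by simp] at hloop ⊢
  rw [hloop]

-- ===== VERDICT (by name: the statement is the Claim_ definition above) =====
theorem solve_spec : Claim_equal_solve := by
  intro A B _ hpre
  obtain ⟨h1, h2⟩ := hpre
  unfold Spec_solve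
  obtain ⟨b, rfl⟩ : ∃ b : Nat, B = (b : Int) := ⟨B.toNat, (Int.toNat_of_nonneg (by omega)).symm⟩
  have hb : 1 ≤ b := by exact_mod_cast h1
  have hbn : b ≤ A.length := by exact_mod_cast h2
  rw [alt_eq_wSum A b hb hbn, a_eq_wSum A b hb hbn]
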